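-- pv_equiv track=rewrite | github.com/Rulylake/adventOfCode2025 | Day6.py | get_index_length
-- ===== SOURCE A (Python) =====
-- def get_index_length(operations):
--     lengths = []
--
--     count = 1
--
--     for elem in operations[1:]:
--         if elem == '+' or elem == '*':
--             lengths.append(count)
--             count = 1
--         else:
--             count += 1
--
--     lengths.append(count)
--
--     return lengths
-- ===== SOURCE B (Python) =====
-- def get_index_length(operations):
--     # Operator positions (first element never counts as an operator), then
--     # segment lengths are the consecutive differences of the boundary list.
--     positions = [i for i, e in enumerate(operations) if i >= 1 and e in ('+', '*')]
--     bounds = [0] + positions + [len(operations)]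
--     return [hi - lo for lo, hi in zip(bounds, bounds[1:])]
-- ===== Notes on version B (the rewrite author's own statement) =====
-- stated objective: alternative
-- what changed: B replaces A's stateful counter loop by computing the operator positions with one comprehension and returning consecutive differences of the boundary list [0]+positions+[len].
-- outside the precondition, e.g. on get_index_length([]): A returns [1], B returns [0]
import Mathlib
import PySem

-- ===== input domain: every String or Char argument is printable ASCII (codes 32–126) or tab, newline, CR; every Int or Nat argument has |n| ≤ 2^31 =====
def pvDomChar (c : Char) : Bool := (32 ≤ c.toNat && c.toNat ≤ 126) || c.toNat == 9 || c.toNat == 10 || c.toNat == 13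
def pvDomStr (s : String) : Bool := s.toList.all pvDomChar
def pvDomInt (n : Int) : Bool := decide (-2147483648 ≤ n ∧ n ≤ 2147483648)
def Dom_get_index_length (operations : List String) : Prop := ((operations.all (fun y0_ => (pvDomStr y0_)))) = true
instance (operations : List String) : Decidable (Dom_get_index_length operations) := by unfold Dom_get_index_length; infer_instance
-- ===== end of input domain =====

-- B computes segment lengths as consecutive differences of operator positions instead of A's running counter; equal on all non-empty inputs.

-- ===== PORT A =====
def get_index_length (operations : List String) : List Int :=
  let st := (PySem.List.slice operations (some 1) none).foldl
    (fun (st : List Int × Int) elem =>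
      if elem == "+" || elem == "*" then (st.1 ++ [st.2], 1) else (st.1, st.2 + 1))
    (([] : List Int), 1)
  st.1 ++ [st.2]

-- ===== PORT B =====
def get_index_length_alt (operations : List String) : List Int :=
  let positions := ((PySem.List.enumerate operations 0).filter
      (fun p => decide (1 ≤ p.1) && (p.2 == "+" || p.2 == "*"))).map (·.1)
  let bounds := ([0] : List Int) ++ positions ++ [(operations.length : Int)]
  (bounds.zip (PySem.List.slice bounds (some 1) none)).map (fun p => p.2 - p.1)

-- ===== PRECONDITION & SPEC =====
-- Pre_ excludes only the empty list, a defensible-corner artefact: A's counter initialisation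
-- yields a phantom segment [1] there, while B's boundary differences naturally yield [0].
def Pre_get_index_length (operations : List String) : Prop := operations ≠ []
instance (operations : List String) : Decidable (Pre_get_index_length operations) := by unfold Pre_get_index_length; infer_instance

def pvWitness_get_index_length : List String := ["1", "+", "2", "*", "3"]

def Spec_get_index_length (operations : List String) (out : List Int) : Prop := out = get_index_length_alt operations
instance (operations : List String) (out : List Int) : Decidable (Spec_get_index_length operations out) := by unfold Spec_get_index_length; infer_instance

-- ===== CLAIM (what is proved, stated in full; the proofs are below) =====
def Claim_equal_get_index_length : Prop := ∀ (operations : List String), Dom_get_index_length operations → Pre_get_index_length operations → Spec_get_index_length operations (get_index_length operations)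

-- ===== LEMMAS AND PROOFS =====

-- the common value: segment lengths of t with a running count c
def pvSegs : List String → Int → List Int
  | [], c => [c]
  | e :: t, c => if e == "+" || e == "*" then c :: pvSegs t 1 else pvSegs t (c + 1)

-- operator positions in t, positions starting at p
def pvPos : List String → Int → List Int
  | [], _ => []
  | e :: t, p => if e == "+" || e == "*" then p :: pvPos t (p + 1) else pvPos t (p + 1)

-- consecutive differences with previous bound b
def pvAdj : Int → List Int → List Int
  | _, [] => []
  | b, x :: r => (x - b) :: pvAdj x r

theorem pvA_fold (t : List String) (acc : List Int) (c : Int) :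
    (t.foldl
        (fun (st : List Int × Int) elem =>
          if elem == "+" || elem == "*" then (st.1 ++ [st.2], 1) else (st.1, st.2 + 1))
        (acc, c)).1 ++
      [(t.foldl
        (fun (st : List Int × Int) elem =>
          if elem == "+" || elem == "*" then (st.1 ++ [st.2], 1) else (st.1, st.2 + 1))
        (acc, c)).2] = acc ++ pvSegs t c := by
  induction t generalizing acc c with
  | nil => simp [pvSegs]
  | cons e t ih =>
    rw [List.foldl_cons]
    simp only [pvSegs]
    by_cases h : (e == "+" || e == "*") = true
    · rw [if_pos h, if_pos h, ih]
      simp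
    · rw [if_neg h, if_neg h, ih]

theorem pvZip_diff (l : List Int) (b : Int) :
    (((b :: l).zip l).map (fun p => p.2 - p.1)) = pvAdj b l := by
  induction l generalizing b with
  | nil => simp [pvAdj]
  | cons x r ih => simp [pvAdj, ih]

theorem pvEnum_pos (t : List String) (s : Int) (hs : 1 ≤ s) :
    ((PySem.List.enumerate t s).filter
        (fun p => decide (1 ≤ p.1) && (p.2 == "+" || p.2 == "*"))).map (·.1) = pvPos t s := by
  induction t generalizing s with
  | nil => simp [PySem.List.enumerate_nil, pvPos]
  | cons e t ih =>
    rw [PySem.List.enumerate_cons]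
    simp only [List.filter, hs, decide_true, Bool.true_and, pvPos]
    by_cases h : (e == "+" || e == "*") = true
    · simp [h, ih (s + 1) (by omega)]
    · simp [h, ih (s + 1) (by omega)]

theorem pvAdj_pos (t : List String) (p c : Int) :
    pvAdj (p - c) (pvPos t p ++ [p + t.length]) = pvSegs t c := by
  induction t generalizing p c with
  | nil => simp [pvPos, pvSegs, pvAdj]
  | cons e t ih =>
    simp only [pvPos, pvSegs]
    by_cases h : (e == "+" || e == "*") = true
    · simp only [h, if_true, List.cons_append, pvAdj]
      have := ih (p + 1) 1
      rw [show p + 1 - 1 = p by ring] at this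
      congr 1
      · omega
      · rw [show ((e :: t).length : Int) = (t.length : Int) + 1 by simp,
            show p + ((t.length : Int) + 1) = p + 1 + (t.length : Int) by ring]
        exact this
    · simp only [h]
      have := ih (p + 1) (c + 1)
      rw [show p - c = p + 1 - (c + 1) by omega,
          show ((e :: t).length : Int) = (t.length : Int) + 1 by simp,
          show p + ((t.length : Int) + 1) = p + 1 + (t.length : Int) by ring]
      exact this

-- ===== VERDICT (by name: the statement is the Claim_ definition above) =====
theorem get_index_length_spec : Claim_equal_get_index_length := by
  intro operations _ hpre
  unfold Spec_get_index_length get_index_length get_index_length_alt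
  obtain ⟨h, t, rfl⟩ : ∃ h t, operations = h :: t := by
    cases operations with
    | nil => exact absurd rfl hpre
    | cons h t => exact ⟨h, t, rfl⟩
  rw [PySem.List.slice_from_one]
  simp only [List.tail_cons]
  rw [pvA_fold t [] 1, List.nil_append]
  rw [PySem.List.enumerate_cons]
  simp only [List.filter, show (decide (1 ≤ (0:Int)) && (h == "+" || h == "*")) = false by simp]
  simp only [zero_add]
  rw [pvEnum_pos t 1 le_rfl]
  rw [PySem.List.slice_from_one]
  simp only [List.cons_append, List.tail_cons]
  rw [pvZip_diff]
  have hmain := pvAdj_pos t 1 1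
  rw [show (1 : Int) - 1 = 0 by ring] at hmain
  rw [show ((h :: t).length : Int) = 1 + (t.length : Int) by simp; omega]
  rw [List.nil_append]; exact hmain.symm
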